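-- pv_equiv track=rewrite | github.com/jam928/python-algo | leetcode/arrays_and_hashing/maximum_total_sum.py | maximum_total_sum
-- ===== SOURCE A (Python) =====
-- from typing import List
--
-- def maximum_total_sum(maximum_height: List[int]) -> int:
--     # sort the array
--     maximum_height = sorted(maximum_height, reverse=True)
--
--     max_sum_heights = maximum_height[0]
--     for i in range(1, len(maximum_height)):
--         # the current height would the min of the max of the current height or -1 from its previous neighbor
--         maximum_height[i] = min(maximum_height[i], maximum_height[i - 1] - 1)
--         if maximum_height[i] <= 0:
--             return -1
--         max_sum_heights += maximum_height[i]
--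
--     return max_sum_heights
-- ===== SOURCE B (Python) =====
-- from typing import List
--
-- def maximum_total_sum(maximum_height: List[int]) -> int:
--     # Closed form: after sorting descending, the i-th capped height equals
--     # (min over j <= i of h[j] + j) - i, since capping at prev-1 propagates as a
--     # prefix minimum of the index-shifted values.  Build the prefix minima of
--     # h[i] + i, subtract the indices back, then validate and sum.
--     hs = sorted(maximum_height, reverse=True)
--     shifted = [h + i for i, h in enumerate(hs)]
--     mins = []
--     m = None
--     for s in shifted:
--         m = s if m is None else min(m, s)
--         mins.append(m)
--     caps = [m - i for i, m in enumerate(mins)]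
--     if any(c <= 0 for c in caps[1:]):
--         return -1
--     return sum(caps)
-- ===== Notes on version B (the rewrite author's own statement) =====
-- stated objective: alternative
-- what changed: B computes each capped height by the closed form (prefix-min of h[j]+j) - i over the descending sort, then validates and sums in separate passes, instead of A's sequential min(h, prev-1) capping with an in-loop accumulator and early return; on the empty list A raises IndexError while B returns 0.
-- crash fix: On the empty list A raises IndexError (maximum_height[0]); B returns 0. — e.g. on maximum_total_sum([]): A raises IndexError, B returns 0
import Mathlib
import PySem

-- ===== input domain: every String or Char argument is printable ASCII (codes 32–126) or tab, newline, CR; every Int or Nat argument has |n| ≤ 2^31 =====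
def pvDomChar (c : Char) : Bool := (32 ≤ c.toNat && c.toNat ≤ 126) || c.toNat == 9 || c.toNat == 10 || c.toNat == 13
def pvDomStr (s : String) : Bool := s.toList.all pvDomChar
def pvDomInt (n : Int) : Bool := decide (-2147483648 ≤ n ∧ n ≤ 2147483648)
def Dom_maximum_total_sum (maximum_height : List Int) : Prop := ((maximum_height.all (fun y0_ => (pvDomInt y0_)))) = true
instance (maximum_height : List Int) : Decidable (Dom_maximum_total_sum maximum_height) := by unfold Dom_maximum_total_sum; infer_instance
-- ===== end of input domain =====

-- B computes each capped height by the closed form (prefix-min of h[j]+j) - i over the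
-- descending sort, then validates and sums in separate passes (alternative algorithm,
-- same cost); on the empty list A raises IndexError, B returns 0.


-- ===== PORT A =====
-- the for-loop: only the previous (already updated) element and the running sum are live state
def pvALoop (prev acc : Int) : List Int → Int
  | [] => acc
  | h :: t =>
    let cur := min h (prev - 1)       -- maximum_height[i] = min(maximum_height[i], maximum_height[i-1] - 1)
    if cur ≤ 0 then -1
    else pvALoop cur (acc + cur) t

def maximum_total_sum (maximum_height : List Int) : Int :=
  match PySem.List.sorted maximum_height (fun x => x) true with
  | [] => 0                           -- unreachable under Pre_: Python raises IndexError on maximum_height[0]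
  | h :: t => pvALoop h h t           -- max_sum_heights = maximum_height[0]; loop over the rest

-- ===== PORT B =====
-- shifted = [h + i for i, h in enumerate(hs)]  (k is the running index)
def pvShift (k : Int) : List Int → List Int
  | [] => []
  | h :: t => (h + k) :: pvShift (k + 1) t

-- the prefix-minimum loop once m is set (m = s if m is None else min(m, s))
def pvPrefMin (m : Int) : List Int → List Int
  | [] => []
  | s :: t => min m s :: pvPrefMin (min m s) t

-- first iteration sets m = s (m is None)
def pvMins : List Int → List Int
  | [] => []
  | s :: t => s :: pvPrefMin s t

-- caps = [m - i for i, m in enumerate(mins)]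
def pvUnshift (k : Int) : List Int → List Int
  | [] => []
  | m :: t => (m - k) :: pvUnshift (k + 1) t

def maximum_total_sum_alt (maximum_height : List Int) : Int :=
  let hs := PySem.List.sorted maximum_height (fun x => x) true
  let shifted := pvShift 0 hs
  let mins := pvMins shifted
  let caps := pvUnshift 0 mins
  if (caps.drop 1).any (fun x => decide (x ≤ 0)) then -1   -- any(c <= 0 for c in caps[1:])
  else caps.sum                                            -- sum(caps); sum([]) = 0

-- ===== PRECONDITION & SPEC =====
-- Pre_ excludes only the empty list, on which A raises IndexError at maximum_height[0].
def Pre_maximum_total_sum (maximum_height : List Int) : Prop := maximum_height ≠ []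
instance (maximum_height : List Int) : Decidable (Pre_maximum_total_sum maximum_height) := by unfold Pre_maximum_total_sum; infer_instance
def pvWitness_maximum_total_sum : List Int := ([3, 2, 2, 1])

-- On the empty list A raises IndexError; B returns 0.
def Raises_maximum_total_sum (maximum_height : List Int) : Prop := maximum_height = []
instance (maximum_height : List Int) : Decidable (Raises_maximum_total_sum maximum_height) := by unfold Raises_maximum_total_sum; infer_instance
def pvRaiseWitness_maximum_total_sum : List Int := ([])
def pvRaiseWitnessOut_maximum_total_sum : Int := 0

def Spec_maximum_total_sum (maximum_height : List Int) (out : Int) : Prop := out = maximum_total_sum_alt maximum_height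
instance (maximum_height : List Int) (out : Int) : Decidable (Spec_maximum_total_sum maximum_height out) := by unfold Spec_maximum_total_sum; infer_instance

-- ===== CLAIM (what is proved, stated in full; the proofs are below) =====
def Claim_equal_maximum_total_sum : Prop := ∀ (maximum_height : List Int), Dom_maximum_total_sum maximum_height → Pre_maximum_total_sum maximum_height → Spec_maximum_total_sum maximum_height (maximum_total_sum maximum_height)
def Claim_raises_maximum_total_sum : Prop := (∀ (maximum_height : List Int), Dom_maximum_total_sum maximum_height → Raises_maximum_total_sum maximum_height → ¬ Pre_maximum_total_sum maximum_height) ∧ (Dom_maximum_total_sum (pvRaiseWitness_maximum_total_sum) ∧ Raises_maximum_total_sum (pvRaiseWitness_maximum_total_sum) ∧ maximum_total_sum_alt (pvRaiseWitness_maximum_total_sum) = pvRaiseWitnessOut_maximum_total_sum)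

-- ===== LEMMAS AND PROOFS =====
-- proof-only helper: A's capped sequence written as a direct recurrence
def pvCap (prev : Int) : List Int → List Int
  | [] => []
  | h :: t => let c := min h (prev - 1); c :: pvCap c t

-- A's early-exit loop equals: check the whole capped tail, then add its sum.
theorem pvALoop_eq_cap (t : List Int) : ∀ prev acc : Int,
    pvALoop prev acc t =
      if (pvCap prev t).any (fun x => decide (x ≤ 0)) then -1 else acc + (pvCap prev t).sum := by
  induction t with
  | nil => intro prev acc; simp [pvALoop, pvCap]
  | cons h t ih =>
    intro prev acc
    simp only [pvALoop, pvCap, List.any_cons, List.sum_cons]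
    by_cases hc : min h (prev - 1) ≤ 0
    · simp [hc]
    · rw [ih]
      simp [hc]
      split_ifs
      · rfl
      · ring

-- B's prefix-minimum closed form equals A's sequential capping.
theorem pvUnshift_prefMin (t : List Int) : ∀ k m : Int,
    pvUnshift k (pvPrefMin m (pvShift k t)) = pvCap (m - k + 1) t := by
  induction t with
  | nil => intro k m; simp [pvShift, pvPrefMin, pvUnshift, pvCap]
  | cons h t ih =>
    intro k m
    simp only [pvShift, pvPrefMin, pvUnshift, pvCap, ih]
    have e1 : min m (h + k) - (k + 1) + 1 = min h (m - k + 1 - 1) := by omega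
    have e2 : min m (h + k) - k = min h (m - k + 1 - 1) := by omega
    rw [e1, e2]

theorem maximum_total_sum_spec : Claim_equal_maximum_total_sum := by
  intro l _ hpre
  unfold Spec_maximum_total_sum maximum_total_sum maximum_total_sum_alt
  cases hs : PySem.List.sorted l (fun x => x) true with
  | nil =>
    have hperm := PySem.List.sorted_perm l (fun x => x) true
    rw [hs] at hperm
    exact absurd hperm.nil_eq.symm hpre
  | cons h t =>
    simp only [pvShift, pvMins, pvUnshift]
    rw [pvUnshift_prefMin]
    have e : h + 0 - (0 + 1) + 1 = h := by ring
    have e0 : h + 0 - 0 = h := by ring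
    rw [e, e0, pvALoop_eq_cap]
    simp only [List.drop_succ_cons, List.drop_zero, List.sum_cons]

-- ===== VERDICT (by name: the statement is the Claim_ definition above) =====
@[simp] theorem maximum_total_sum_raises : Claim_raises_maximum_total_sum := by
  unfold Claim_raises_maximum_total_sum
  exact ⟨fun l _ hr hp => hp hr, by decide⟩
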